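-- pv_equiv track=rewrite | github.com/Tushaar28/CodeForces | 1209A.py | minColors
-- ===== SOURCE A (Python) =====
-- def minColors(arr):
--     color = 0
--     done = set()
--     arr = sorted(arr)
--     for i in range(len(arr)):
--         if(arr[i] not in done):
--             color += 1
--             done.add(arr[i])
--         for j in range(len(arr)):
--             if(arr[i] == arr[j]):
--                 continue
--             if(arr[j] % arr[i] == 0):
--                 done.add(arr[j])
--     return color
-- ===== SOURCE B (Python) =====
-- def minColors(arr):
--     vals = set(arr)
--     return sum(1 for v in vals if not any(u < v and v % u == 0 for u in vals))
-- ===== Notes on version B (the rewrite author's own statement) =====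
-- stated objective: simpler
-- what changed: Instead of sorting and sweeping the whole list while forward-marking multiples of each element in a 'done' set, B dedupes to a set once and directly counts the distinct values that have no smaller present divisor (one comprehension, no sort, no marking set); pair checks run over distinct values only.
import Mathlib
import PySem

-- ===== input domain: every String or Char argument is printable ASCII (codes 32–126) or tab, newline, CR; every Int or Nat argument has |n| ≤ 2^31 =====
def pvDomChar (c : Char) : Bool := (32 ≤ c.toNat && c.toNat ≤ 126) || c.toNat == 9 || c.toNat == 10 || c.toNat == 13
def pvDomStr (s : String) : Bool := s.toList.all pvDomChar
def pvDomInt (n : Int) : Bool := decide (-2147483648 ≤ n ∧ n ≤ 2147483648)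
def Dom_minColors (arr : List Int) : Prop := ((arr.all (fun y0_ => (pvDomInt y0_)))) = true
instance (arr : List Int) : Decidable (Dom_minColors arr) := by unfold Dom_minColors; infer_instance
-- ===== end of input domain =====

-- B replaces A's sort + nested marking sweep by a single count over the distinct values
-- of those with no smaller present divisor (objective: simpler; same answer, no sort, no marking set).


-- ===== PORT A =====
def minColors (arr : List Int) : Int :=
  let a := PySem.List.sorted arr (fun x => x)
  let r := (PySem.List.pyRange 0 (a.length : Int) 1).foldl (fun st i =>
      let x := PySem.List.pyGetD a i 0
      let st1 := if PySem.Set.contains st.2 x then st else (st.1 + 1, PySem.Set.add st.2 x)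
      (st1.1,
        (PySem.List.pyRange 0 (a.length : Int) 1).foldl (fun d j =>
          let y := PySem.List.pyGetD a j 0
          if y == x then d
          else if PySem.Int.mod y x == 0 then PySem.Set.add d y else d) st1.2))
    ((0 : Int), (PySem.Set.empty : PySem.Set Int))
  r.1

-- ===== PORT B =====
def minColors_alt (arr : List Int) : Int :=
  let vals : PySem.Set Int := PySem.Set.ofList arr
  ((vals.countP (fun v => !(vals.any (fun u => decide (u < v) && (PySem.Int.mod v u == 0))))) : Int)

-- ===== PRECONDITION & SPEC =====
-- Pre_ excludes exactly the inputs where Python A raises ZeroDivisionError: lists containing 0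
-- together with some nonzero element (A computes arr[j] % 0 there).
def Pre_minColors (arr : List Int) : Prop := (0 : Int) ∈ arr → ∀ x ∈ arr, x = (0 : Int)
instance (arr : List Int) : Decidable (Pre_minColors arr) := by unfold Pre_minColors; infer_instance
def pvWitness_minColors : List Int := ([2, 4, 3, 4, 5] : List Int)

def Spec_minColors (arr : List Int) (out : Int) : Prop := out = minColors_alt arr
instance (arr : List Int) (out : Int) : Decidable (Spec_minColors arr out) := by unfold Spec_minColors; infer_instance

-- ===== CLAIM (what is proved, stated in full; the proofs are below) =====
def Claim_equal_minColors : Prop := ∀ (arr : List Int), Dom_minColors arr → Pre_minColors arr → Spec_minColors arr (minColors arr)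

-- ===== LEMMAS AND PROOFS =====

-- A's inner loop body (marks multiples of x)
def pvInnerStep (x : Int) (d : PySem.Set Int) (y : Int) : PySem.Set Int :=
  if y == x then d else if PySem.Int.mod y x == 0 then PySem.Set.add d y else d

-- A's outer loop body
def pvOuterStep (a : List Int) (st : Int × PySem.Set Int) (x : Int) : Int × PySem.Set Int :=
  ((if PySem.Set.contains st.2 x then st else (st.1 + 1, PySem.Set.add st.2 x)).1,
   a.foldl (pvInnerStep x) (if PySem.Set.contains st.2 x then st else (st.1 + 1, PySem.Set.add st.2 x)).2)

-- "v has a smaller divisor present in a"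
def pvP (a : List Int) (v : Int) : Bool := a.any (fun u => decide (u < v) && (PySem.Int.mod v u == 0))

theorem pvP_iff (a : List Int) (v : Int) :
    pvP a v = true ↔ ∃ u ∈ a, u < v ∧ PySem.Int.mod v u = 0 := by
  simp [pvP, List.any_eq_true]

def pvOuterStepR (a : List Int) (st : Int × PySem.Set Int) (x : Int) : Int × PySem.Set Int :=
  ((if PySem.Set.contains st.2 x then st else (st.1 + 1, PySem.Set.add st.2 x)).1,
   (PySem.List.pyRange 0 (a.length : Int) 1).foldl
    (fun d j => pvInnerStep x d (PySem.List.pyGetD a j 0))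
    (if PySem.Set.contains st.2 x then st else (st.1 + 1, PySem.Set.add st.2 x)).2)

theorem minColors_eq_foldl (arr : List Int) :
    minColors arr = ((PySem.List.sorted arr (fun x => x)).foldl
      (pvOuterStep (PySem.List.sorted arr (fun x => x))) ((0 : Int), (PySem.Set.empty : PySem.Set Int))).1 := by
  have hR : pvOuterStepR (PySem.List.sorted arr (fun x => x)) = pvOuterStep (PySem.List.sorted arr (fun x => x)) := by
    funext st x
    unfold pvOuterStepR pvOuterStep
    rw [PySem.List.foldl_pyRange_zero_pyGetD' (PySem.List.sorted arr (fun x => x)) 0 (pvInnerStep x)]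
  calc minColors arr
      = (List.foldl
          (fun st i => pvOuterStepR (PySem.List.sorted arr (fun x => x)) st
            (PySem.List.pyGetD (PySem.List.sorted arr (fun x => x)) i 0))
          ((0 : Int), (PySem.Set.empty : PySem.Set Int))
          (PySem.List.pyRange 0 ((PySem.List.sorted arr (fun x => x)).length : Int) 1)).1 := rfl
    _ = ((PySem.List.sorted arr (fun x => x)).foldl
          (pvOuterStepR (PySem.List.sorted arr (fun x => x))) ((0 : Int), (PySem.Set.empty : PySem.Set Int))).1 := by
        rw [PySem.List.foldl_pyRange_zero_pyGetD' (PySem.List.sorted arr (fun x => x)) 0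
          (pvOuterStepR (PySem.List.sorted arr (fun x => x)))]
    _ = _ := by rw [hR]

theorem mem_inner_foldl (a : List Int) (x : Int) :
    ∀ (d : PySem.Set Int) (z : Int),
      z ∈ a.foldl (pvInnerStep x) d ↔ z ∈ d ∨ (z ∈ a ∧ z ≠ x ∧ PySem.Int.mod z x = 0) := by
  induction a with
  | nil => simp
  | cons y t ih =>
    intro d z
    rw [List.foldl_cons, ih]
    unfold pvInnerStep
    by_cases hyx : y = x
    · subst hyx
      simp only [beq_self_eq_true, if_true, List.mem_cons]
      constructor
      · rintro (h | ⟨hz, hne, hm⟩)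
        · exact Or.inl h
        · exact Or.inr ⟨Or.inr hz, hne, hm⟩
      · rintro (h | ⟨hz | hz, hne, hm⟩)
        · exact Or.inl h
        · exact absurd hz hne
        · exact Or.inr ⟨hz, hne, hm⟩
    · have hbeq : (y == x) = false := by simp [hyx]
      simp only [hbeq, Bool.false_eq_true, if_false, List.mem_cons]
      by_cases hm : PySem.Int.mod y x = 0
      · have hb : (PySem.Int.mod y x == 0) = true := by simp [hm]
        simp only [hb, if_true, PySem.Set.mem_add]
        constructor
        · rintro ((h | h) | ⟨hz, hne, hmm⟩)
          · exact Or.inl h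
          · exact Or.inr ⟨Or.inl h, h ▸ hyx, h ▸ hm⟩
          · exact Or.inr ⟨Or.inr hz, hne, hmm⟩
        · rintro (h | ⟨hz | hz, hne, hmm⟩)
          · exact Or.inl (Or.inl h)
          · exact Or.inl (Or.inr hz)
          · exact Or.inr ⟨hz, hne, hmm⟩
      · have hb : (PySem.Int.mod y x == 0) = false := by simp [hm]
        simp only [hb, Bool.false_eq_true, if_false]
        constructor
        · rintro (h | ⟨hz, hne, hmm⟩)
          · exact Or.inl h
          · exact Or.inr ⟨Or.inr hz, hne, hmm⟩
        · rintro (h | ⟨hz | hz, hne, hmm⟩)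
          · exact Or.inl h
          · exact absurd (hz ▸ hmm) hm
          · exact Or.inr ⟨hz, hne, hmm⟩

theorem marked_iff (p t : List Int) (x : Int)
    (hs : (p ++ x :: t).Pairwise (· ≤ ·)) :
    (∃ u ∈ p, u ≠ x ∧ PySem.Int.mod x u = 0) ↔ pvP (p ++ x :: t) x = true := by
  rw [List.pairwise_append] at hs
  obtain ⟨hp, hxt, hcross⟩ := hs
  rw [List.pairwise_cons] at hxt
  rw [pvP_iff]
  constructor
  · rintro ⟨u, hu, hne, hm⟩
    refine ⟨u, by simp [hu], lt_of_le_of_ne (hcross u hu x (List.mem_cons_self ..)) hne, hm⟩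
  · rintro ⟨u, hu, hlt, hm⟩
    rcases List.mem_append.mp hu with hu | hu
    · exact ⟨u, hu, ne_of_lt hlt, hm⟩
    · rcases List.mem_cons.mp hu with rfl | hu
      · exact absurd hlt (lt_irrefl _)
      · exact absurd hlt (not_lt.mpr (hxt.1 u hu))

theorem outer_inv (a : List Int) (hs : a.Pairwise (· ≤ ·)) :
    ∀ (s p : List Int) (c : Int) (d : PySem.Set Int),
      a = p ++ s →
      (∀ z : Int, z ∈ d ↔ (z ∈ p ∨ (z ∈ a ∧ ∃ u ∈ p, u ≠ z ∧ PySem.Int.mod z u = 0))) →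
      c = ((PySem.Set.ofList p).countP (fun v => !pvP a v) : Int) →
      (s.foldl (pvOuterStep a) (c, d)).1
        = ((PySem.Set.ofList a).countP (fun v => !pvP a v) : Int) := by
  intro s
  induction s with
  | nil =>
    intro p c d hpa _ hc
    simp only [List.foldl_nil]
    rw [hc, hpa, List.append_nil]
  | cons x t ih =>
    intro p c d hpa hd hc
    have hsplit : a = (p ++ [x]) ++ t := by rw [hpa]; simp
    have hxa : x ∈ a := by rw [hpa]; simp
    have hmark : (∃ u ∈ p, u ≠ x ∧ PySem.Int.mod x u = 0) ↔ pvP a x = true := by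
      rw [hpa] at hs ⊢; exact marked_iff p t x hs
    simp only [List.foldl_cons]
    by_cases hxd : x ∈ d
    · -- x already done: color unchanged
      have hstep : pvOuterStep a (c, d) x = (c, a.foldl (pvInnerStep x) d) := by
        simp [pvOuterStep, hxd]
      rw [hstep]
      apply ih (p ++ [x]) c _ hsplit
      · intro z
        rw [mem_inner_foldl, hd z]
        constructor
        · rintro ((hz | ⟨hza, u, hu, hne, hm⟩) | ⟨hza, hne, hm⟩)
          · exact Or.inl (by simp [hz])
          · exact Or.inr ⟨hza, u, by simp [hu], hne, hm⟩
          · exact Or.inr ⟨hza, x, by simp, Ne.symm hne, hm⟩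
        · rintro (hz | ⟨hza, u, hu, hne, hm⟩)
          · rcases List.mem_append.mp hz with hz | hz
            · exact Or.inl (Or.inl hz)
            · -- z = x, and x ∈ d, so the d-characterization of x applies
              have hzx : z = x := by simpa using hz
              subst hzx
              exact Or.inl ((hd z).mp hxd)
          · rcases List.mem_append.mp hu with hu | hu
            · exact Or.inl (Or.inr ⟨hza, u, hu, hne, hm⟩)
            · have hux : u = x := by simpa using hu
              subst hux
              exact Or.inr ⟨hza, Ne.symm hne, hm⟩
      · -- count unchanged
        rw [hc, PySem.Set.ofList_append_singleton]
        rcases (hd x).mp hxd with hxp | ⟨_, hex⟩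
        · -- x already seen: add is a no-op
          simp [PySem.Set.add, hxp]
        · -- x is marked: the predicate is false at x, count unchanged
          have hpv : pvP a x = true := hmark.mp hex
          by_cases hxp : x ∈ p
          · simp [PySem.Set.add, hxp]
          · simp [PySem.Set.add, hxp, List.countP_append, hpv]
    · -- x not done: color increments, x is freshly counted
      have hstep : pvOuterStep a (c, d) x = (c + 1, a.foldl (pvInnerStep x) (PySem.Set.add d x)) := by
        simp [pvOuterStep, hxd]
      rw [hstep]
      have hxp : x ∉ p := fun h => hxd ((hd x).mpr (Or.inl h))
      have hnomark : ¬ ∃ u ∈ p, u ≠ x ∧ PySem.Int.mod x u = 0 :=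
        fun h => hxd ((hd x).mpr (Or.inr ⟨hxa, h⟩))
      have hpv : pvP a x = false := by
        rw [← Bool.not_eq_true]; exact fun h => hnomark (hmark.mpr h)
      apply ih (p ++ [x]) (c + 1) _ hsplit
      · intro z
        rw [mem_inner_foldl, PySem.Set.mem_add, hd z]
        constructor
        · rintro (((hz | ⟨hza, u, hu, hne, hm⟩) | hzx) | ⟨hza, hne, hm⟩)
          · exact Or.inl (by simp [hz])
          · exact Or.inr ⟨hza, u, by simp [hu], hne, hm⟩
          · exact Or.inl (by simp [hzx])
          · exact Or.inr ⟨hza, x, by simp, Ne.symm hne, hm⟩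
        · rintro (hz | ⟨hza, u, hu, hne, hm⟩)
          · rcases List.mem_append.mp hz with hz | hz
            · exact Or.inl (Or.inl (Or.inl hz))
            · exact Or.inl (Or.inr (by simpa using hz))
          · rcases List.mem_append.mp hu with hu | hu
            · exact Or.inl (Or.inl (Or.inr ⟨hza, u, hu, hne, hm⟩))
            · have hux : u = x := by simpa using hu
              subst hux
              exact Or.inr ⟨hza, Ne.symm hne, hm⟩
      · -- count grows by one: x passes the predicate
        rw [hc, PySem.Set.ofList_append_singleton]
        simp only [PySem.Set.add]
        have hxop : PySem.Set.contains (PySem.Set.ofList p) x = false := by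
          rw [← Bool.not_eq_true, PySem.Set.contains_iff, PySem.Set.mem_ofList]
          exact hxp
        rw [hxop]
        simp [List.countP_append, hpv]

theorem minColors_eq_count (arr : List Int) :
    minColors arr = ((PySem.Set.ofList (PySem.List.sorted arr (fun x => x))).countP
      (fun v => !pvP (PySem.List.sorted arr (fun x => x)) v) : Int) := by
  rw [minColors_eq_foldl]
  exact outer_inv _ (PySem.List.sorted_pairwise arr (fun x => x)) _ [] 0 PySem.Set.empty rfl
    (by intro z; simp [PySem.Set.empty]) (by simp)

-- ===== VERDICT (by name: the statement is the Claim_ definition above) =====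
theorem minColors_spec : Claim_equal_minColors := by
  intro arr _ _
  unfold Spec_minColors minColors_alt
  rw [minColors_eq_count]
  have hperm : (PySem.Set.ofList (PySem.List.sorted arr (fun x => x))).Perm (PySem.Set.ofList arr) := by
    apply (List.perm_ext_iff_of_nodup (PySem.Set.nodup_ofList _) (PySem.Set.nodup_ofList _)).mpr
    intro z
    simp [PySem.Set.mem_ofList, PySem.List.mem_sorted]
  have hpred : ∀ v : Int,
      (!pvP (PySem.List.sorted arr (fun x => x)) v)
        = (!(PySem.Set.ofList arr).any (fun u => decide (u < v) && (PySem.Int.mod v u == 0))) := by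
    intro v
    congr 1
    rw [Bool.eq_iff_iff]
    simp [pvP, List.any_eq_true, PySem.Set.mem_ofList, PySem.List.mem_sorted]
  simp only [hpred] at *
  rw [hperm.countP_eq]
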